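-- pv_equiv track=rewrite | github.com/piotr-lukasiak/BinSortSequence | laSort.py | AisleSorting
-- ===== SOURCE A (Python) =====
-- def AisleSorting(SortStyle, Aisle1, Aisle2):
--     SortedAisle = []
--     if 'AisleZig' in SortStyle:
--         while Aisle1.__len__() > 0:
--             SortedAisle.append(str(Aisle1[0])+"."+SortStyle)
--             SortedAisle.append(str(Aisle2[0])+"."+SortStyle)
--             del Aisle1[0]
--             del Aisle2[0]
--             continue
--
--     if 'AisleReverseZig' in SortStyle:
--         while Aisle1.__len__() > 0:
--             SortedAisle.append(str(Aisle2[-1])+"."+SortStyle)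
--             SortedAisle.append(str(Aisle1[-1])+"."+SortStyle)
--             del Aisle1[-1]
--             del Aisle2[-1]
--             continue
--     return [str(x).split(".") for x in SortedAisle]
-- ===== SOURCE B (Python) =====
-- # B: one pass over zip of the lists (no destructive front/back deletions), suffix split computed once.
-- # Unlike A, B does not mutate Aisle1/Aisle2 (A empties them); equivalence is about the return value.
-- def AisleSorting(SortStyle, Aisle1, Aisle2):
--     suffix = SortStyle.split(".")
--     if 'AisleZig' in SortStyle:
--         return [[str(v)] + suffix for p in zip(Aisle1, Aisle2) for v in p]
--     if 'AisleReverseZig' in SortStyle: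
--         return [[str(v)] + suffix for p in zip(reversed(Aisle2), reversed(Aisle1)) for v in p]
--     return []
-- ===== Notes on version B (the rewrite author's own statement) =====
-- stated objective: alternative
-- what changed: B replaces A's destructive while-loops (repeated del from the front/back of both lists) with a single comprehension over zip of the lists (resp. their reverses) and computes the '.'-split label suffix once instead of concatenating and re-splitting per element; B does not mutate Aisle1/Aisle2 (A empties them) - equivalence is about the return value.
import Mathlib
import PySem

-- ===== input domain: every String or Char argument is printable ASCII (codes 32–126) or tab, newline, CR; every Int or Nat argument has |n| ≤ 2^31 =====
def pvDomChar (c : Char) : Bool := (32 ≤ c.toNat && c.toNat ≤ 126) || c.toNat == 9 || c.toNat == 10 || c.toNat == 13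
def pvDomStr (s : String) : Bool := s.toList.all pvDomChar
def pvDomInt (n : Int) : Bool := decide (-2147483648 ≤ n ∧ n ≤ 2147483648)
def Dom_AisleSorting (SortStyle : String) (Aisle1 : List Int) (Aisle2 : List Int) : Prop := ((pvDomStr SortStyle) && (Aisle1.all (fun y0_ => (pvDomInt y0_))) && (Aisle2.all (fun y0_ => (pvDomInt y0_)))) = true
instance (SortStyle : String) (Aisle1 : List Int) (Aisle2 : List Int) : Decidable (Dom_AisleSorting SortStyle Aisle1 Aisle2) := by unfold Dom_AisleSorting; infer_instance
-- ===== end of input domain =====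

-- B replaces A's destructive front/back deletions with one pass over zip and computes the split
-- suffix once (objective: alternative).  A empties Aisle1/Aisle2 in place, B does not mutate its
-- arguments; the equivalence proved here is about the RETURN value only.

-- ===== PORT A =====
-- the 'AisleZig' while-loop: appends the two labelled strings, deletes the heads of both lists;
-- returns (SortedAisle, Aisle1, Aisle2) after the loop.  Inside Pre_ the second list is never
-- exhausted first; outside Pre_ Python raises IndexError (here headD's default is never the issue:
-- such inputs are excluded by Pre_).
def aZigLoop (S : String) : List Int → List Int → List String → List String × List Int × List Int
  | [], a2, acc => (acc, [], a2)
  | x :: a1, a2, acc =>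
      aZigLoop S a1 a2.tail
        (acc ++ [PySem.Int.toStr x ++ "." ++ S, PySem.Int.toStr (a2.headD 0) ++ "." ++ S])

-- the 'AisleReverseZig' while-loop: appends Aisle2[-1] then Aisle1[-1], deletes both last elements
def aRevLoop (S : String) (a1 a2 : List Int) (acc : List String) : List String × List Int × List Int :=
  if a1 = [] then (acc, a1, a2)
  else
    aRevLoop S a1.dropLast a2.dropLast
      (acc ++ [PySem.Int.toStr (a2.getLastD 0) ++ "." ++ S,
               PySem.Int.toStr (a1.getLastD 0) ++ "." ++ S])
  termination_by a1.length
  decreasing_by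
    rename_i h
    have := List.length_pos_iff.mpr h
    simp [List.length_dropLast]
    omega

def AisleSorting (SortStyle : String) (Aisle1 : List Int) (Aisle2 : List Int) : List (List String) :=
  let s1 := if PySem.Str.isIn "AisleZig" SortStyle then
              aZigLoop SortStyle Aisle1 Aisle2 []
            else ([], Aisle1, Aisle2)
  let s2 := if PySem.Str.isIn "AisleReverseZig" SortStyle then
              aRevLoop SortStyle s1.2.1 s1.2.2 s1.1
            else s1
  -- [str(x).split(".") for x in SortedAisle]; sep "." ≠ "" so split? is never none
  s2.1.map (fun x => (PySem.Str.split? x ".").getD [])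

-- ===== PORT B =====
def AisleSorting_alt (SortStyle : String) (Aisle1 : List Int) (Aisle2 : List Int) : List (List String) :=
  let suffix := (PySem.Str.split? SortStyle ".").getD []   -- SortStyle.split("."), computed once
  if PySem.Str.isIn "AisleZig" SortStyle then
    (Aisle1.zip Aisle2).flatMap
      (fun p => [PySem.Int.toStr p.1 :: suffix, PySem.Int.toStr p.2 :: suffix])
  else if PySem.Str.isIn "AisleReverseZig" SortStyle then
    (Aisle2.reverse.zip Aisle1.reverse).flatMap
      (fun p => [PySem.Int.toStr p.1 :: suffix, PySem.Int.toStr p.2 :: suffix])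
  else []

-- ===== PRECONDITION & SPEC =====
-- A raises IndexError (Aisle2[0] / Aisle2[-1] on the emptied list) when a zig branch is taken and
-- Aisle2 is shorter than Aisle1; exactly those inputs are excluded.
def Pre_AisleSorting (SortStyle : String) (Aisle1 : List Int) (Aisle2 : List Int) : Prop :=
  (PySem.Str.isIn "AisleZig" SortStyle = true ∨ PySem.Str.isIn "AisleReverseZig" SortStyle = true) →
    Aisle1.length ≤ Aisle2.length
instance (SortStyle : String) (Aisle1 : List Int) (Aisle2 : List Int) : Decidable (Pre_AisleSorting SortStyle Aisle1 Aisle2) := by unfold Pre_AisleSorting; infer_instance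
def pvWitness_AisleSorting : String × List Int × List Int := ("AisleZig", [1, -2], [3, 4, 5])

def Spec_AisleSorting (SortStyle : String) (Aisle1 : List Int) (Aisle2 : List Int) (out : List (List String)) : Prop := out = AisleSorting_alt SortStyle Aisle1 Aisle2
instance (SortStyle : String) (Aisle1 : List Int) (Aisle2 : List Int) (out : List (List String)) : Decidable (Spec_AisleSorting SortStyle Aisle1 Aisle2 out) := by unfold Spec_AisleSorting; infer_instance

-- ===== CLAIM (what is proved, stated in full; the proofs are below) =====
def Claim_equal_AisleSorting : Prop := ∀ (SortStyle : String) (Aisle1 : List Int) (Aisle2 : List Int), Dom_AisleSorting SortStyle Aisle1 Aisle2 → Pre_AisleSorting SortStyle Aisle1 Aisle2 → Spec_AisleSorting SortStyle Aisle1 Aisle2 (AisleSorting SortStyle Aisle1 Aisle2)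
-- ===== LEMMAS AND PROOFS =====

-- '.'-splitting, characterised without fuel
def splitPure (pre : List Char) : List Char → List (List Char)
  | [] => [pre]
  | c :: rest => if c = '.' then pre :: splitPure [] rest else splitPure (pre ++ [c]) rest

lemma go_spec : ∀ (fuel : Nat) (l cur : List Char) (acc : List (List Char)), l.length < fuel →
    PySem.Chars.splitOn.go ['.'] fuel l cur acc = acc.reverse ++ splitPure cur.reverse l := by
  intro fuel
  induction fuel with
  | zero => intro l cur acc h; omega
  | succ fuel ih =>
    intro l cur acc h
    cases l with
    | nil =>
      rw [PySem.Chars.splitOn.go]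
      simp [splitPure]
      omega
    | cons c rest =>
      rw [PySem.Chars.splitOn.go]
      by_cases hc : c = '.'
      · subst hc
        rw [if_pos (by simp [List.isPrefixOf])]
        have hr : List.drop ['.'].length ('.' :: rest) = rest := by simp
        rw [hr, ih rest [] (cur.reverse :: acc) (by simp at h; omega)]
        simp [splitPure]
      · have hpf : ['.'].isPrefixOf (c :: rest) = false := by
          simp [List.isPrefixOf]
          exact fun hh => absurd hh.symm hc
        rw [if_neg (by simp [hpf])]
        rw [ih rest (c :: cur) acc (by simp at h; omega)]
        simp [splitPure, hc]

lemma splitOn_eq_splitPure (t : List Char) :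
    PySem.Chars.splitOn t ['.'] = splitPure [] t := by
  rw [PySem.Chars.splitOn, go_spec (t.length + 1) t [] [] (by omega)]
  simp

lemma splitPure_append : ∀ (a pre s : List Char), '.' ∉ a →
    splitPure pre (a ++ '.' :: s) = (pre ++ a) :: splitPure [] s := by
  intro a
  induction a with
  | nil => intro pre s _; simp [splitPure]
  | cons c a' ih =>
    intro pre s h
    have hc : ¬ c = '.' := by intro hh; exact h (by simp [hh])
    simp only [List.cons_append, splitPure, if_neg hc]
    rw [ih _ _ (by intro hh; exact h (List.mem_cons_of_mem _ hh))]
    simp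

lemma digitChar_ne_dot {m : Nat} (h : m < 10) : Nat.digitChar m ≠ '.' := by
  interval_cases m <;> decide

lemma dot_not_mem_toDigits (n : Nat) : '.' ∉ Nat.toDigits 10 n := by
  induction n using Nat.strong_induction_on with
  | _ n ih =>
    rw [Nat.toDigits_eq_if (by norm_num)]
    split
    · rename_i hlt
      simp [(digitChar_ne_dot hlt).symm]
    · rename_i hge
      intro h
      rcases List.mem_append.mp h with h1 | h2
      · exact ih (n / 10) (Nat.div_lt_self (by omega) (by norm_num)) h1
      · simp at h2
        exact digitChar_ne_dot (Nat.mod_lt n (by norm_num)) h2.symm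

lemma dot_not_mem_toChars (x : Int) : '.' ∉ PySem.Int.toChars x := by
  unfold PySem.Int.toChars
  split
  · intro h
    rcases List.mem_cons.mp h with h1 | h2
    · exact absurd h1 (by decide)
    · exact dot_not_mem_toDigits _ h2
  · exact dot_not_mem_toDigits _

-- str(x) + "." + S splits into str(x) followed by the pieces of S
lemma split_item (x : Int) (S : String) :
    (PySem.Str.split? (PySem.Int.toStr x ++ "." ++ S) ".").getD [] =
      PySem.Int.toStr x :: (PySem.Str.split? S ".").getD [] := by
  have hnot : '.' ∉ (PySem.Int.toStr x).toList := by
    rw [PySem.Int.toList_toStr]; exact dot_not_mem_toChars x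
  have hsep : ("." : String).toList = ['.'] := rfl
  have htl : (PySem.Int.toStr x ++ "." ++ S).toList
      = (PySem.Int.toStr x).toList ++ '.' :: S.toList := by
    simp [String.toList_append]
  simp only [PySem.Str.split?, PySem.Chars.split?, hsep, htl, List.isEmpty_cons,
    if_neg Bool.false_ne_true, Option.map_some, Option.getD_some,
    splitOn_eq_splitPure]
  rw [splitPure_append _ _ _ hnot]
  simp
  rw [← PySem.Int.toList_toStr, String.ofList_toList]

lemma aZigLoop_spec (S : String) : ∀ (a1 a2 : List Int) (acc : List String),
    a1.length ≤ a2.length →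
    aZigLoop S a1 a2 acc =
      (acc ++ (a1.zip a2).flatMap
        (fun p => [PySem.Int.toStr p.1 ++ "." ++ S, PySem.Int.toStr p.2 ++ "." ++ S]),
       [], a2.drop a1.length) := by
  intro a1
  induction a1 with
  | nil => intro a2 acc _; simp [aZigLoop]
  | cons x t ih =>
    intro a2 acc h
    cases a2 with
    | nil => simp at h
    | cons y t2 =>
      simp only [aZigLoop, List.tail_cons, List.headD_cons]
      rw [ih t2 _ (by simpa using h)]
      simp

lemma aRevLoop_concat (S : String) (l : List Int) (x : Int) (a2 : List Int) (acc : List String) :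
    aRevLoop S (l ++ [x]) a2 acc =
      aRevLoop S l a2.dropLast
        (acc ++ [PySem.Int.toStr (a2.getLastD 0) ++ "." ++ S, PySem.Int.toStr x ++ "." ++ S]) := by
  conv_lhs => rw [aRevLoop]
  rw [if_neg (by simp), List.dropLast_concat, List.getLastD_concat]

lemma aRevLoop_spec (S : String) : ∀ (r1 r2 : List Int) (acc : List String),
    r1.length ≤ r2.length →
    (aRevLoop S r1.reverse r2.reverse acc).1 =
      acc ++ (r2.zip r1).flatMap
        (fun p => [PySem.Int.toStr p.1 ++ "." ++ S, PySem.Int.toStr p.2 ++ "." ++ S]) := by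
  intro r1
  induction r1 with
  | nil => intro r2 acc _; simp [aRevLoop]
  | cons x t1 ih =>
    intro r2 acc h
    cases r2 with
    | nil => simp at h
    | cons y t2 =>
      have h1 : (x :: t1).reverse = t1.reverse ++ [x] := by simp
      have h2 : (y :: t2).reverse = t2.reverse ++ [y] := by simp
      rw [h1, h2, aRevLoop_concat]
      rw [List.dropLast_concat, List.getLastD_concat]
      rw [ih t2 _ (by simpa using h)]
      simp

-- ===== VERDICT (by name: the statement is the Claim_ definition above) =====
theorem AisleSorting_spec : Claim_equal_AisleSorting := by
  intro S a1 a2 _hDom hPre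
  unfold Spec_AisleSorting AisleSorting AisleSorting_alt
  by_cases hz : PySem.Str.isIn "AisleZig" S = true
  · have hlen := hPre (Or.inl hz)
    simp at hz
    by_cases hr : PySem.Str.isIn "AisleReverseZig" S = true <;> simp at hr <;>
      simp [hz, hr, aZigLoop_spec S a1 a2 [] hlen, aRevLoop, List.map_flatMap, split_item]
  · simp at hz
    by_cases hr : PySem.Str.isIn "AisleReverseZig" S = true
    · have hlen := hPre (Or.inr hr)
      simp at hr
      have hrev := aRevLoop_spec S a1.reverse a2.reverse [] (by simpa using hlen)
      simp only [List.reverse_reverse] at hrev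
      simp [hz, hr, hrev, List.map_flatMap, split_item]
    · simp at hr
      simp [hz, hr]
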